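-- pv_equiv track=rewrite | github.com/beaudoco/CSE-582-POS-TAGGING | utils/word_embeddings.py | term_freq_dict
-- ===== SOURCE A (Python) =====
-- def term_freq_dict(sentences):
--     tf_dict = {}
--     i = 0
--     for sentence in sentences:
--         sentence_dict = {}
--         split = sentence.split(" ")
--         for word in split:
--             if word not in sentence_dict.keys():
--                 sentence_dict[word] = split.count(word)
--         tf_dict[i] = sentence_dict
--         i += 1
--     return tf_dict
-- ===== SOURCE B (Python) =====
-- def _freq(words):
--     if not words:
--         return {}
--     head = words[0]
--     rest = [w for w in words[1:] if w != head]
--     out = {head: len(words) - len(rest)}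
--     out.update(_freq(rest))
--     return out
--
--
-- def term_freq_dict(sentences):
--     return {i: _freq(s.split(" ")) for i, s in enumerate(sentences)}
-- ===== Notes on version B (the rewrite author's own statement) =====
-- stated objective: alternative
-- what changed: Per sentence, A loops over every word with a membership guard and rescans split.count(word); B recursively partitions the word list: take the head word, filter it out of the tail, obtain its count as the length difference, and recurse on the remainder, with the outer dict built by enumerate.
import Mathlib
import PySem

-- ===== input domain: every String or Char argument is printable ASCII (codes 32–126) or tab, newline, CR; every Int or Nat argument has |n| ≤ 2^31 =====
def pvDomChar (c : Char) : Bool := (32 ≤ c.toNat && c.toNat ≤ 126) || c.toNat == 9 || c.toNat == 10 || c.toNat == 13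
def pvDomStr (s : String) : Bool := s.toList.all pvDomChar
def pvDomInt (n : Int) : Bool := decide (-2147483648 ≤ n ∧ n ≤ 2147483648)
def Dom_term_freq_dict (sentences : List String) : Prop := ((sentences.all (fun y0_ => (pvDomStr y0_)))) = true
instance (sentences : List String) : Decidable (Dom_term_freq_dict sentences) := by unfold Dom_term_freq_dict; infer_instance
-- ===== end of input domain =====

-- B replaces A's membership-guarded split.count(word) loop by a recursive partition of the word
-- list (head word, count by length difference after filtering, recurse on the rest); objective:
-- alternative (not measured faster).


-- ===== PORT A =====
-- inner loop: for word in split: if word not in sentence_dict.keys(): sentence_dict[word] = split.count(word)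
def pvAInnerDict (split : List String) : PySem.Dict String Int :=
  split.foldl
    (fun sd word =>
      if sd.contains word then sd
      else sd.insert word ((PySem.List.count split word : Nat) : Int))
    PySem.Dict.empty

def term_freq_dict (sentences : List String) : List (Int × List (String × Int)) :=
  let st := sentences.foldl
    (fun (st : PySem.Dict Int (PySem.Dict String Int) × Int) sentence =>
      let split := (PySem.Str.split? sentence " ").getD []   -- sep " " ≠ "", so split? is some: exact
      (st.1.insert st.2 (pvAInnerDict split), st.2 + 1))
    (PySem.Dict.empty, 0)
  st.1.items.map (fun p => (p.1, p.2.items))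

-- ===== PORT B =====
-- _freq: if not words: {}; head = words[0]; rest = [w for w in words[1:] if w != head];
--        out = {head: len(words) - len(rest)}; out.update(_freq(rest)); return out
def pvFreq (words : List String) : PySem.Dict String Int :=
  match words with
  | [] => PySem.Dict.empty
  | head :: tail =>
    let rest := tail.filter (fun w => w ≠ head)
    let out := (PySem.Dict.empty.insert head ((words.length : Int) - (rest.length : Int)))
    out.update (pvFreq rest).items
  termination_by words.length
  decreasing_by simp; exact (List.length_filter_le _ _).trans (le_of_eq (List.length_attach))

def term_freq_dict_alt (sentences : List String) : List (Int × List (String × Int)) :=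
  (PySem.List.enumerate sentences).map
    (fun p => (p.1, (pvFreq ((PySem.Str.split? p.2 " ").getD [])).items))

-- ===== PRECONDITION & SPEC =====
def Spec_term_freq_dict (sentences : List String) (out : List (Int × List (String × Int))) : Prop := out = term_freq_dict_alt sentences
instance (sentences : List String) (out : List (Int × List (String × Int))) : Decidable (Spec_term_freq_dict sentences out) := by unfold Spec_term_freq_dict; infer_instance

-- ===== CLAIM =====
def Claim_equal_term_freq_dict : Prop := ∀ (sentences : List String), Dom_term_freq_dict sentences → Spec_term_freq_dict sentences (term_freq_dict sentences)

-- ===== LEMMAS AND PROOFS =====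

-- A's guarded-insert loop appends, in first-occurrence order, each unseen word with its count.
lemma pvA_fold_items (c : String → Int) (l : List String) (d : PySem.Dict String Int) :
    (l.foldl (fun sd w => if sd.contains w then sd else sd.insert w (c w)) d).items
      = d.items ++ ((PySem.Set.ofList l).filter (fun w => !(d.contains w))).map (fun w => (w, c w)) := by
  induction l generalizing d with
  | nil => simp [PySem.Set.ofList_nil]
  | cons w t ih =>
    rw [List.foldl_cons, PySem.Set.ofList_cons]
    by_cases h : d.contains w = true
    · rw [if_pos h, ih]
      have : ((PySem.Set.ofList t).discard w).filter (fun x => !(d.contains x))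
          = (PySem.Set.ofList t).filter (fun x => !(d.contains x)) := by
        simp only [PySem.Set.discard, List.filter_filter]
        apply List.filter_congr
        intro x _
        by_cases hx : x = w
        · subst hx; simp [h]
        · simp [hx]
      simp [h, this]
    · have h' : d.contains w = false := by simpa using h
      rw [if_neg h, ih]
      rw [PySem.Dict.items_insert_of_not_contains d (c w) h']
      have hfilt : (PySem.Set.ofList t).filter (fun x => !((d.insert w (c w)).contains x))
          = ((PySem.Set.ofList t).discard w).filter (fun x => !(d.contains x)) := by
        simp only [PySem.Set.discard, List.filter_filter]
        apply List.filter_congr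
        intro x _
        rw [PySem.Dict.contains_insert]
        simp [Bool.and_comm]
      simp [hfilt, h']

-- A's per-sentence dict: items are the distinct words in first-occurrence order with their counts.
lemma pvAInner_items (split : List String) :
    (pvAInnerDict split).items
      = (PySem.Set.ofList split).map (fun w => (w, ((PySem.List.count split w : Nat) : Int))) := by
  rw [pvAInnerDict, pvA_fold_items]
  simp [PySem.Dict.empty]

-- filtering is length-splitting
lemma pv_length_filter_split (p : String → Bool) (l : List String) :
    (l.filter p).length + (l.filter (fun a => !p a)).length = l.length := by
  induction l with
  | nil => simp
  | cons a t ih => by_cases h : p a <;> simp [h] <;> omega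

-- set of a ≠-filter = discard of the set
lemma pv_ofList_filter_ne (t : List String) (h : String) :
    PySem.Set.ofList (t.filter (fun x => x ≠ h)) = (PySem.Set.ofList t).discard h := by
  induction t with
  | nil => simp [PySem.Set.ofList_nil, PySem.Set.discard]
  | cons a t ih =>
    by_cases hah : a = h
    · subst hah
      have hl : (a :: t).filter (fun x => decide (x ≠ a)) = t.filter (fun x => decide (x ≠ a)) := by
        simp
      rw [hl, ih, PySem.Set.ofList_cons]
      simp only [PySem.Set.discard, List.filter_cons, List.filter_filter]
      simp
    · rw [List.filter_cons, if_pos (by simpa using hah), PySem.Set.ofList_cons,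
          PySem.Set.ofList_cons, ih]
      simp only [PySem.Set.discard, List.filter_cons, List.filter_filter]
      have : (fun y => !y == h && !y == a) = (fun y => !y == a && !y == h) := by
        funext y; exact Bool.and_comm _ _
      simp [hah, this]

-- B's recursive partition produces the same items list.
lemma pvFreq_items (words : List String) :
    (pvFreq words).items
      = (PySem.Set.ofList words).map (fun w => (w, ((PySem.List.count words w : Nat) : Int))) := by
  match words with
  | [] => simp [pvFreq, PySem.Set.ofList_nil, PySem.Dict.empty]
  | head :: tail =>
    have ih := pvFreq_items (tail.filter (fun w => w ≠ head))
    rw [pvFreq]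
    set rest := tail.filter (fun w => w ≠ head) with hrest
    set c : Int := (((head :: tail).length : Nat) : Int) - ((rest.length : Nat) : Int) with hc
    have hofl : PySem.Set.ofList rest = (PySem.Set.ofList tail).discard head :=
      pv_ofList_filter_ne tail head
    -- the singleton dict {head: c}
    have hsing : (PySem.Dict.empty.insert head c).items = [(head, c)] := by
      rw [PySem.Dict.items_insert_of_not_contains _ _ (PySem.Dict.contains_empty head)]
      simp [PySem.Dict.empty]
    -- keys of the recursive dict avoid head and are distinct
    have hkeys : (pvFreq rest).items.map Prod.fst = PySem.Set.ofList rest := by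
      rw [ih]; simp [List.map_map, Function.comp_def]
    have hfresh : ∀ p ∈ (pvFreq rest).items, (PySem.Dict.empty.insert head c).contains p.1 = false := by
      intro p hp
      have hk : p.1 ∈ (pvFreq rest).items.map Prod.fst := List.mem_map_of_mem hp
      rw [hkeys, hofl] at hk
      have hne : p.1 ≠ head := by
        simp only [PySem.Set.discard, List.mem_filter] at hk
        simpa using hk.2
      simp [PySem.Dict.contains_insert, hne, PySem.Dict.empty]
    have hnodup : ((pvFreq rest).items.map Prod.fst).Nodup := by
      rw [hkeys]; exact PySem.Set.nodup_ofList rest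
    -- out.update(freq rest) appends the fresh items
    have hupd : ((PySem.Dict.empty.insert head c).update (pvFreq rest).items).items
        = [(head, c)] ++ (pvFreq rest).items := by
      have := PySem.Dict.items_foldl_insert_fresh (l := (pvFreq rest).items)
        (k := Prod.fst) (v := Prod.snd) (d := PySem.Dict.empty.insert head c) hfresh hnodup
      rw [show (PySem.Dict.empty.insert head c).update (pvFreq rest).items
            = (pvFreq rest).items.foldl (fun d p => d.insert p.1 p.2) (PySem.Dict.empty.insert head c) from rfl]
      rw [this, hsing]; simp
    rw [hupd, ih, PySem.Set.ofList_cons, List.map_cons, List.singleton_append]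
    congr 1
    · -- head's entry: c = count of head
      have h2 : PySem.List.count (head :: tail) head = (tail.filter (fun a => !decide (a ≠ head))).length + 1 := by
        show (head :: tail).count head = _
        rw [List.count_cons_self, List.count, List.countP_eq_length_filter]
        have : (fun a => !decide (a ≠ head)) = (fun x => x == head) := by
          funext a; by_cases h : a = head <;> simp [h]
        rw [this]
      have h1 := pv_length_filter_split (fun x => decide (x ≠ head)) tail
      have h3 : rest.length = (tail.filter (fun x => decide (x ≠ head))).length := by rw [hrest]
      have h4 : (head :: tail).length = tail.length + 1 := by simp
      simp only [Prod.mk.injEq, true_and]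
      rw [hc, h2, h3, h4]
      push_cast
      omega
    · -- remaining entries: counts unchanged by removing head
      rw [hofl]
      apply List.map_congr_left
      intro w hw
      have hne : w ≠ head := by
        simp only [PySem.Set.discard, List.mem_filter] at hw
        simpa using hw.2
      have h1 : PySem.List.count rest w = tail.count w := by
        have : rest.count w = tail.count w := by
          rw [hrest]; exact List.count_filter (by simp [hne])
        simpa [PySem.List.count] using this
      have h2 : PySem.List.count (head :: tail) w = tail.count w := by
        simp [PySem.List.count, Ne.symm hne]
      rw [h1, h2]
  termination_by words.length
  decreasing_by simp only [List.length_cons]; exact Nat.lt_succ_of_le (List.length_filter_le _ _)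

-- A's outer loop over (dict, running index) enumerates the sentences.
lemma pvA_outer_items (f : String → PySem.Dict String Int) (l : List String)
    (d : PySem.Dict Int (PySem.Dict String Int)) (n : Int) (h : ∀ k ∈ d.keys, k < n) :
    (l.foldl (fun st s => (st.1.insert st.2 (f s), st.2 + 1)) (d, n)).1.items
      = d.items ++ (PySem.List.enumerate l n).map (fun p => (p.1, f p.2)) := by
  induction l generalizing d n with
  | nil => simp [PySem.List.enumerate_nil]
  | cons s t ih =>
    rw [List.foldl_cons, PySem.List.enumerate_cons]
    have hc : d.contains n = false := by
      by_cases hb : d.contains n = true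
      · exact absurd (h n ((PySem.Dict.contains_iff_mem_keys d n).mp hb)) (lt_irrefl n)
      · simpa using hb
    have h' : ∀ k ∈ (d.insert n (f s)).keys, k < n + 1 := by
      intro k hk
      rw [PySem.Dict.keys_insert_of_not_contains d (f s) hc] at hk
      rcases List.mem_append.mp hk with hk | hk
      · exact lt_trans (h k hk) (by omega)
      · simp at hk; omega
    rw [ih (d.insert n (f s)) (n + 1) h',
        PySem.Dict.items_insert_of_not_contains d (f s) hc]
    simp

-- ===== VERDICT =====
theorem term_freq_dict_spec : Claim_equal_term_freq_dict := by
  intro sentences _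
  show term_freq_dict sentences = term_freq_dict_alt sentences
  simp only [term_freq_dict, term_freq_dict_alt]
  rw [pvA_outer_items (fun s => pvAInnerDict ((PySem.Str.split? s " ").getD []))
        sentences PySem.Dict.empty 0 (by simp)]
  simp [List.map_map, Function.comp_def, PySem.Dict.empty, pvAInner_items, pvFreq_items]
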